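-- pv_equiv track=rewrite | github.com/HanxianshengGame/EffectivePython | 3.2_简单的接口应该接受函数，而不是类的实例.py | increment_with_report
-- ===== SOURCE A (Python) =====
-- from collections import defaultdict
--
-- def increment_with_report(current, increments):
--     add_count = [0]
--
--     def missing():
--         add_count[0] += 1
--         return 0
--
--     result = defaultdict(missing, current)
--     for key, amount in increments:
--         result[key] += amount
--     return result, add_count[0]
-- ===== SOURCE B (Python) =====
-- from collections import defaultdict
--
-- def increment_with_report(current, increments):
--     result = defaultdict(int, current)
--     for key, amount in increments:
--         result[key] += amount
--     added = len({key for key, _ in increments} - set(current))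
--     return result, added
-- ===== Notes on version B (the rewrite author's own statement) =====
-- stated objective: simpler
-- what changed: B drops the stateful defaultdict-factory counting trick: it accumulates with a plain defaultdict(int) and computes the newly-created-key count in a separate pass as a set difference (distinct increment keys minus current's keys) instead of counting __missing__ calls via a mutable closure.
import Mathlib
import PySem

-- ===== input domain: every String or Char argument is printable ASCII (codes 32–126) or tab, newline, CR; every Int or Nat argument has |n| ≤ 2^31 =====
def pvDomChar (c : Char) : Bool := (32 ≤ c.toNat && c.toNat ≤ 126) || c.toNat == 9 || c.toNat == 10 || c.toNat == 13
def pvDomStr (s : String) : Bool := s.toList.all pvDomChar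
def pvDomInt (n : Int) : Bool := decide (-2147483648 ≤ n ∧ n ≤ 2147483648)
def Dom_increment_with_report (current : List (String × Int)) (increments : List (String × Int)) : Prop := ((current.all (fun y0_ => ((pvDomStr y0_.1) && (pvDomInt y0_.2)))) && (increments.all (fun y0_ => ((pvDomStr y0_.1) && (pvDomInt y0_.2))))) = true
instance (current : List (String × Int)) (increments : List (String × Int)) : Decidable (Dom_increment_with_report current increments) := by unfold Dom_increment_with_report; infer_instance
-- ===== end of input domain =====

-- B drops A's stateful defaultdict-factory counting trick: plain accumulation plus a separate
-- set-difference pass for the newly-created-key count (objective: simpler; same cost).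


-- ===== PORT A =====
-- result[key] += amount on defaultdict(missing, current): a present key is overwritten with v + amount;
-- an absent key triggers missing() (count += 1, insert 0), then the 0 is overwritten with 0 + amount.
def increment_with_report (current : List (String × Int)) (increments : List (String × Int)) : (List (String × Int)) × Int :=
  let st := increments.foldl
    (fun (st : PySem.Dict String Int × Int) kv =>
      match st.1.get? kv.1 with
      | some v => (st.1.insert kv.1 (v + kv.2), st.2)
      | none => ((st.1.insert kv.1 0).insert kv.1 (0 + kv.2), st.2 + 1))
    (PySem.Dict.ofList current, (0 : Int))
  (st.1.items, st.2)

-- ===== PORT B =====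
def increment_with_report_alt (current : List (String × Int)) (increments : List (String × Int)) : (List (String × Int)) × Int :=
  let result := increments.foldl
    (fun (d : PySem.Dict String Int) kv => d.insert kv.1 (d.getD kv.1 0 + kv.2))
    (PySem.Dict.ofList current)
  let added := PySem.Set.len
    (PySem.Set.diff (PySem.Set.ofList (increments.map (fun kv => kv.1)))
      (PySem.Dict.ofList current).keys)
  (result.items, added)

-- ===== PRECONDITION & SPEC =====
def Spec_increment_with_report (current : List (String × Int)) (increments : List (String × Int)) (out : (List (String × Int)) × Int) : Prop := out = increment_with_report_alt current increments
instance (current : List (String × Int)) (increments : List (String × Int)) (out : (List (String × Int)) × Int) : Decidable (Spec_increment_with_report current increments out) := by unfold Spec_increment_with_report; infer_instance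

-- ===== CLAIM (what is proved, stated in full; the proofs are below) =====
def Claim_equal_increment_with_report : Prop := ∀ (current : List (String × Int)) (increments : List (String × Int)), Dom_increment_with_report current increments → Spec_increment_with_report current increments (increment_with_report current increments)

-- ===== LEMMAS AND PROOFS =====

-- filtering out keys of `d.insert k v` = first dropping k, then filtering out keys of d
lemma filter_not_contains_insert (d : PySem.Dict String Int) (k : String) (v : Int) (s : List String) :
    s.filter (fun x => !((d.insert k v).contains x))
      = (s.filter (fun y => !(y == k))).filter (fun x => !(d.contains x)) := by
  rw [List.filter_filter]
  apply List.filter_congr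
  intro x _
  simp [PySem.Dict.contains_insert]
  rw [Bool.and_comm]

-- the fold of A's loop computes B's dict together with the count of first-seen new keys
lemma foldA_eq (incs : List (String × Int)) : ∀ (d : PySem.Dict String Int) (c : Int),
    incs.foldl
      (fun (st : PySem.Dict String Int × Int) kv =>
        match st.1.get? kv.1 with
        | some v => (st.1.insert kv.1 (v + kv.2), st.2)
        | none => ((st.1.insert kv.1 0).insert kv.1 (0 + kv.2), st.2 + 1)) (d, c)
    = (incs.foldl (fun (d : PySem.Dict String Int) kv => d.insert kv.1 (d.getD kv.1 0 + kv.2)) d,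
       c + (((PySem.Set.ofList (incs.map (fun kv => kv.1))).filter
              (fun k => !(d.contains k))).length : Int)) := by
  induction incs with
  | nil => intro d c; simp [PySem.Set.ofList]
  | cons kv t ih =>
    intro d c
    simp only [List.foldl_cons, List.map_cons, PySem.Set.ofList_cons]
    cases h : d.get? kv.1 with
    | some v =>
      have hc : d.contains kv.1 = true := by
        rw [PySem.Dict.contains_eq_isSome_get?, h]; rfl
      rw [ih]
      have hd : d.getD kv.1 0 = v := by rw [PySem.Dict.getD_eq_get?_getD, h]; rfl
      rw [hd]
      refine Prod.ext rfl ?_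
      simp only [List.filter_cons, hc]
      rw [filter_not_contains_insert]
      simp [PySem.Set.discard]
    | none =>
      have hc : d.contains kv.1 = false := by
        rw [PySem.Dict.contains_eq_isSome_get?, h]; rfl
      rw [PySem.Dict.insert_insert_self, ih]
      have hd : d.getD kv.1 0 = (0 : Int) := by rw [PySem.Dict.getD_eq_get?_getD, h]; rfl
      rw [hd]
      refine Prod.ext rfl ?_
      simp only [List.filter_cons, hc]
      rw [filter_not_contains_insert]
      simp only [PySem.Set.discard]
      simp
      ring

-- ===== VERDICT (by name: the statement is the Claim_ definition above) =====
theorem increment_with_report_spec : Claim_equal_increment_with_report := by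
  intro current increments _
  unfold Spec_increment_with_report increment_with_report increment_with_report_alt
  simp only [foldA_eq]
  refine Prod.ext rfl ?_
  simp only [PySem.Set.len, PySem.Set.diff, zero_add]
  have hf : (PySem.Set.ofList (increments.map (fun kv => kv.1))).filter
        (fun k => !((PySem.Dict.ofList current).contains k))
      = (PySem.Set.ofList (increments.map (fun kv => kv.1))).filter
        (fun x => !(PySem.Set.contains (PySem.Dict.ofList current).keys x)) := by
    apply List.filter_congr
    intro x _
    rw [PySem.Dict.contains_eq_decide_mem_keys]
    simp [PySem.Set.contains]
  rw [hf]
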